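-- pv_equiv track=rewrite | github.com/rodrigomartin/ejerciciospython | area52.py | ordenar_extraterrestre
-- ===== SOURCE A (Python) =====
-- def ordenar_extraterrestre(lista, alfabeto):
--     ordenada = lista
--     listo = False
--     while (listo == False):
--         listo = True
--         for i in range(1, len(ordenada)):
--             palabra1 = ordenada[i-1]
--             palabra2 = ordenada[i]
--             orden = determina_orden(palabra1, palabra2, alfabeto)
--
--             if orden[0] != palabra1 and orden[1] != palabra2:
--                 ordenada[i-1] = orden[0]
--                 ordenada[i] = orden[1]
--                 listo = False
--     return ordenada
--
-- def determina_orden(palabra1, palabra2, alfabeto):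
--     orden = [palabra1, palabra2]
--     largo1 = len(palabra1)
--     largo2 = len(palabra2)
--
--     for i in range(0, largo1):
--         if i == largo2:
--             orden = [palabra2, palabra1]
--             break
--
--         letra1 = palabra1[i]
--         letra2 = palabra2[i]
--         pos1 = alfabeto.find(letra1)
--         pos2 = alfabeto.find(letra2)
--
--         if pos1 < pos2:
--             orden = [palabra1, palabra2]
--             break
--         elif pos2 < pos1:
--             orden = [palabra2, palabra1]
--             break
--
--     return orden
-- ===== SOURCE B (Python) =====
-- def ordenar_extraterrestre(lista, alfabeto):
--     # Stable library sort on a precomputed key (list of alphabet positions);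
--     # sorts the caller's list in place, like the original.
--     lista.sort(key=lambda palabra: [alfabeto.find(letra) for letra in palabra])
--     return lista
-- ===== Notes on version B (the rewrite author's own statement) =====
-- stated objective: faster
-- what changed: Replaces the bubble-sort passes with a per-word comparator by one in-place stable library sort on a precomputed key (the list of alfabeto.find positions of each letter).
import Mathlib
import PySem

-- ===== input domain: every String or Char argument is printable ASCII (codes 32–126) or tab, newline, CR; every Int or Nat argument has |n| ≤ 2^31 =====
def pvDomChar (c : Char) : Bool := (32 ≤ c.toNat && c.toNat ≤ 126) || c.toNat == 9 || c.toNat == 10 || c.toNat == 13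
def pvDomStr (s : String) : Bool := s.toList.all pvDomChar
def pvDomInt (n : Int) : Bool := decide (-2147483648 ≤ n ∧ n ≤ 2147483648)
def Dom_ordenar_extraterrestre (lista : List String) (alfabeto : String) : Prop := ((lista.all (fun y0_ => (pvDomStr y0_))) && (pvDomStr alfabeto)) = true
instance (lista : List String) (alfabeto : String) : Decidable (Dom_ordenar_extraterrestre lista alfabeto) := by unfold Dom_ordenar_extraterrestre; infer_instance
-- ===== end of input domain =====

-- B replaces A's repeated bubble-sort passes by one stable library sort on a precomputed
-- key (the list of alfabeto.find positions); like A, B sorts the caller's list in place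
-- (the equivalence proved here is about the returned value).

-- ===== PORT A =====

-- alfabeto.find(letra) for a one-character string letra (PySem.Str.find on .toList; exact)
def pvFind (alfabeto : String) (letra : Char) : Int := PySem.Chars.find alfabeto.toList [letra]

-- the 'for i in range(0, largo1)' loop of determina_orden: one recursion step per iteration,
-- same comparisons in the same order, breaks = returns
def determina_orden_go (alfabeto : String) (palabra1 palabra2 : String) :
    List Char → List Char → String × String
  | [], _ => (palabra1, palabra2)                -- loop ran out: orden unchanged
  | _ :: _, [] => (palabra2, palabra1)           -- i == largo2
  | letra1 :: resto1, letra2 :: resto2 =>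
    let pos1 := pvFind alfabeto letra1
    let pos2 := pvFind alfabeto letra2
    if pos1 < pos2 then (palabra1, palabra2)
    else if pos2 < pos1 then (palabra2, palabra1)
    else determina_orden_go alfabeto palabra1 palabra2 resto1 resto2

def determina_orden (palabra1 palabra2 alfabeto : String) : String × String :=
  determina_orden_go alfabeto palabra1 palabra2 palabra1.toList palabra2.toList

-- the 'for i in range(1, len(ordenada))' pass over the mutable list: palabra1 is ordenada[i-1]
def pvPassGo (alfabeto : String) (palabra1 : String) : List String → List String × Bool
  | [] => ([palabra1], true)
  | palabra2 :: resto =>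
    let orden := determina_orden palabra1 palabra2 alfabeto
    if orden.1 ≠ palabra1 ∧ orden.2 ≠ palabra2 then
      let r := pvPassGo alfabeto orden.2 resto
      (orden.1 :: r.1, false)
    else
      let r := pvPassGo alfabeto palabra2 resto
      (palabra1 :: r.1, r.2)

def pvPass (alfabeto : String) : List String → List String × Bool
  | [] => ([], true)
  | palabra1 :: resto => pvPassGo alfabeto palabra1 resto

-- the 'while (listo == False)' loop; the fuel only guards termination (a pass with a swap
-- strictly decreases the inversion count, so the fuel below is never exhausted — proved)
def pvLoopA (alfabeto : String) : Nat → List String → List String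
  | fuel, ordenada =>
    let r := pvPass alfabeto ordenada
    if r.2 then r.1
    else match fuel with
      | 0 => r.1
      | n + 1 => pvLoopA alfabeto n r.1

def ordenar_extraterrestre (lista : List String) (alfabeto : String) : List String :=
  pvLoopA alfabeto (lista.length * lista.length + 1) lista

-- ===== PORT B =====

-- the sort key: [alfabeto.find(letra) for letra in palabra]
def pvKey (alfabeto : String) (palabra : String) : List Int := palabra.toList.map (pvFind alfabeto)

-- lista.sort(key=...) : stable sort on the precomputed key (Python list-of-int comparison
-- = lexicographic order on List Int)
def ordenar_extraterrestre_alt (lista : List String) (alfabeto : String) : List String :=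
  PySem.List.sorted lista (pvKey alfabeto) false

-- ===== PRECONDITION & SPEC =====
def Spec_ordenar_extraterrestre (lista : List String) (alfabeto : String) (out : List String) : Prop := out = ordenar_extraterrestre_alt lista alfabeto
instance (lista : List String) (alfabeto : String) (out : List String) : Decidable (Spec_ordenar_extraterrestre lista alfabeto out) := by unfold Spec_ordenar_extraterrestre; infer_instance

-- ===== CLAIM (what is proved, stated in full; the proofs are below) =====
def Claim_equal_ordenar_extraterrestre : Prop := ∀ (lista : List String) (alfabeto : String), Dom_ordenar_extraterrestre lista alfabeto → Spec_ordenar_extraterrestre lista alfabeto (ordenar_extraterrestre lista alfabeto)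

-- ===== LEMMAS AND PROOFS =====

-- determina_orden_go decides exactly the lexicographic comparison of the key lists
theorem det_go_spec (alfabeto p1 p2 : String) (l1 l2 : List Char) :
    determina_orden_go alfabeto p1 p2 l1 l2 =
      if l2.map (pvFind alfabeto) < l1.map (pvFind alfabeto) then (p2, p1) else (p1, p2) := by
  induction l1 generalizing l2 with
  | nil => simp [determina_orden_go, List.not_lt_nil]
  | cons c1 r1 ih =>
    cases l2 with
    | nil => simp [determina_orden_go, List.nil_lt_cons]
    | cons c2 r2 =>
      simp only [determina_orden_go, List.map_cons]
      rcases lt_trichotomy (pvFind alfabeto c1) (pvFind alfabeto c2) with h | h | h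
      · rw [if_pos h, if_neg]
        intro hcon
        rcases List.cons_lt_cons_iff.mp hcon with h' | ⟨he, _⟩
        · omega
        · omega
      · rw [if_neg (by omega), if_neg (by omega), ih]
        by_cases h2 : r2.map (pvFind alfabeto) < r1.map (pvFind alfabeto)
        · rw [if_pos h2, if_pos (List.cons_lt_cons_iff.mpr (Or.inr ⟨h.symm, h2⟩))]
        · rw [if_neg h2, if_neg]
          intro hcon
          rcases List.cons_lt_cons_iff.mp hcon with h' | ⟨_, h'⟩
          · omega
          · exact h2 h'
      · rw [if_neg (by omega), if_pos h, if_pos (List.cons_lt_cons_iff.mpr (Or.inl h))]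

theorem det_spec (alfabeto a b : String) :
    determina_orden a b alfabeto =
      if pvKey alfabeto b < pvKey alfabeto a then (b, a) else (a, b) := by
  rw [determina_orden, det_go_spec]; rfl

-- one pass, rewritten through the key comparison
theorem pass_go_eq (alfabeto x y : String) (t : List String) :
    pvPassGo alfabeto x (y :: t) =
      if pvKey alfabeto y < pvKey alfabeto x
      then ((y :: (pvPassGo alfabeto x t).1), false)
      else (x :: (pvPassGo alfabeto y t).1, (pvPassGo alfabeto y t).2) := by
  rw [pvPassGo, det_spec]
  by_cases h : pvKey alfabeto y < pvKey alfabeto x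
  · have hxy : x ≠ y := by
      intro he; rw [he] at h; exact lt_irrefl _ h
    rw [if_pos h, if_pos h]
    simp [Ne.symm hxy, hxy]
  · rw [if_neg h, if_neg h]
    simp

theorem pass_go_perm (alfabeto : String) (t : List String) (x : String) :
    (pvPassGo alfabeto x t).1.Perm (x :: t) := by
  induction t generalizing x with
  | nil => simp [pvPassGo]
  | cons y t ih =>
    rw [pass_go_eq]
    by_cases h : pvKey alfabeto y < pvKey alfabeto x
    · rw [if_pos h]
      exact ((ih x).cons y).trans (List.Perm.swap x y t)
    · rw [if_neg h]
      exact (ih y).cons x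

-- inserting two strictly key-ordered elements commutes (any accumulator)
theorem insertBy_comm (alfabeto : String) (a b : String)
    (hba : pvKey alfabeto b < pvKey alfabeto a) (acc : List String) :
    PySem.List.insertBy (fun u v => decide (pvKey alfabeto u < pvKey alfabeto v)) a
        (PySem.List.insertBy (fun u v => decide (pvKey alfabeto u < pvKey alfabeto v)) b acc)
      = PySem.List.insertBy (fun u v => decide (pvKey alfabeto u < pvKey alfabeto v)) b
        (PySem.List.insertBy (fun u v => decide (pvKey alfabeto u < pvKey alfabeto v)) a acc) := by
  have hab : ¬ pvKey alfabeto a < pvKey alfabeto b := lt_asymm hba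
  induction acc with
  | nil => simp [PySem.List.insertBy, hba, hab]
  | cons c t ih =>
    by_cases hbc : pvKey alfabeto b < pvKey alfabeto c
    · by_cases hac : pvKey alfabeto a < pvKey alfabeto c
      · simp [PySem.List.insertBy, hbc, hac, hba, hab]
      · simp [PySem.List.insertBy, hbc, hac, hab]
    · have hac : ¬ pvKey alfabeto a < pvKey alfabeto c := by
        intro hcon; exact hbc (lt_trans hba hcon)
      simp [PySem.List.insertBy, hbc, hac, ih]

-- sorting is invariant under one bubble pass
theorem pass_go_foldl (alfabeto : String) (t : List String) (x : String) (acc : List String) :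
    ((pvPassGo alfabeto x t).1).foldl
        (fun acc p => PySem.List.insertBy (fun u v => decide (pvKey alfabeto u < pvKey alfabeto v)) p acc) acc
      = (x :: t).foldl
        (fun acc p => PySem.List.insertBy (fun u v => decide (pvKey alfabeto u < pvKey alfabeto v)) p acc) acc := by
  induction t generalizing x acc with
  | nil => rfl
  | cons y t ih =>
    rw [pass_go_eq]
    by_cases h : pvKey alfabeto y < pvKey alfabeto x
    · rw [if_pos h]
      simp only [List.foldl_cons]
      rw [ih, List.foldl_cons, insertBy_comm alfabeto x y h acc]
    · rw [if_neg h]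
      simp only [List.foldl_cons]
      rw [ih, List.foldl_cons]

-- a pass that reports listo = True changed nothing and certifies key-sortedness
theorem pass_go_done (alfabeto : String) (t : List String) (x : String)
    (h : (pvPassGo alfabeto x t).2 = true) :
    (pvPassGo alfabeto x t).1 = x :: t ∧
      (x :: t).Pairwise (fun a b => pvKey alfabeto a ≤ pvKey alfabeto b) := by
  induction t generalizing x with
  | nil => simp [pvPassGo]
  | cons y t ih =>
    rw [pass_go_eq] at h ⊢
    by_cases hlt : pvKey alfabeto y < pvKey alfabeto x
    · rw [if_pos hlt] at h; simp at h
    · rw [if_neg hlt] at h ⊢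
      obtain ⟨h1, h2⟩ := ih y h
      refine ⟨by rw [h1], ?_⟩
      rw [List.pairwise_cons]
      refine ⟨?_, h2⟩
      intro z hz
      rcases List.mem_cons.mp hz with rfl | hz
      · exact not_lt.mp hlt
      · rcases List.pairwise_cons.mp h2 with ⟨hy, _⟩
        exact le_trans (not_lt.mp hlt) (hy z hz)

-- inversion count
def pvCnt (alfabeto : String) (x : String) (l : List String) : Nat :=
  l.countP (fun z => decide (pvKey alfabeto z < pvKey alfabeto x))

def pvInv (alfabeto : String) : List String → Nat
  | [] => 0
  | x :: t => pvCnt alfabeto x t + pvInv alfabeto t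

theorem pass_go_inv (alfabeto : String) (t : List String) (x : String) :
    pvInv alfabeto (pvPassGo alfabeto x t).1 ≤ pvInv alfabeto (x :: t) ∧
      ((pvPassGo alfabeto x t).2 = false →
        pvInv alfabeto (pvPassGo alfabeto x t).1 < pvInv alfabeto (x :: t)) := by
  induction t generalizing x with
  | nil => simp [pvPassGo]
  | cons y t ih =>
    have einv : ∀ (z : String) (l : List String),
        pvInv alfabeto (z :: l) = pvCnt alfabeto z l + pvInv alfabeto l := fun _ _ => rfl
    rw [pass_go_eq]
    by_cases h : pvKey alfabeto y < pvKey alfabeto x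
    · rw [if_pos h]
      have hcnt : pvCnt alfabeto y (pvPassGo alfabeto x t).1 = pvCnt alfabeto y (x :: t) :=
        (pass_go_perm alfabeto t x).countP_eq _
      have hcy : pvCnt alfabeto y (x :: t) = pvCnt alfabeto y t := by
        simp only [pvCnt, List.countP_cons]
        have hnx : ¬ pvKey alfabeto x < pvKey alfabeto y := lt_asymm h
        simp [hnx]
      have hcx : pvCnt alfabeto x (y :: t) = 1 + pvCnt alfabeto x t := by
        simp only [pvCnt, List.countP_cons]
        simp [h]; omega
      have hle := (ih x).1
      rw [einv x t] at hle
      constructor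
      · simp only [einv, hcnt, hcy, hcx]
        omega
      · intro _
        simp only [einv, hcnt, hcy, hcx]
        omega
    · rw [if_neg h]
      have hle := (ih y).1
      have hlt := (ih y).2
      have hcnt : pvCnt alfabeto x (pvPassGo alfabeto y t).1 = pvCnt alfabeto x (y :: t) :=
        (pass_go_perm alfabeto t y).countP_eq _
      rw [einv y t] at hle hlt
      constructor
      · simp only [einv, hcnt]
        omega
      · intro hf
        have := hlt hf
        simp only [einv, hcnt]
        omega

-- PySem.List.sorted as the fold of insertions it is defined to be
theorem sorted_unfold (alfabeto : String) (xs : List String) :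
    PySem.List.sorted xs (pvKey alfabeto) false =
      xs.foldl (fun acc p => PySem.List.insertBy (fun u v => decide (pvKey alfabeto u < pvKey alfabeto v)) p acc) [] := by
  rfl

-- PySem's order lemmas are stated for the LinearOrder-derived instances on List ℤ; the
-- instance pair is irrelevant (Decidable is a subsingleton, the two LT are definitionally equal)
theorem sorted_inst_bridge (xs : List String) (key : String → List Int) :
    PySem.List.sorted xs key false
      = @PySem.List.sorted String (List Int) List.instLinearOrder.toLT LinearOrder.toDecidableLT xs key false := by
  have h : ∀ (d1 d2 : DecidableLT (List Int)),
      @PySem.List.sorted String (List Int) List.instLT d1 xs key false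
        = @PySem.List.sorted String (List Int) List.instLT d2 xs key false := by
    intro d1 d2
    congr 1
  exact h _ _

-- the while loop computes the stable key-sort, given enough fuel
theorem loop_spec (alfabeto : String) (fuel : Nat) (l : List String)
    (hfuel : pvInv alfabeto l ≤ fuel) :
    pvLoopA alfabeto fuel l = PySem.List.sorted l (pvKey alfabeto) false := by
  induction fuel generalizing l with
  | zero =>
    rw [pvLoopA]
    cases l with
    | nil => simp [pvPass, PySem.List.sorted]
    | cons x t =>
      simp only [pvPass]
      cases h2 : (pvPassGo alfabeto x t).2 with
      | false => exact absurd ((pass_go_inv alfabeto t x).2 h2) (by omega)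
      | true =>
        rw [if_pos rfl]
        obtain ⟨h1, hp⟩ := pass_go_done alfabeto t x h2
        rw [h1, sorted_inst_bridge]
        exact (PySem.List.sorted_eq_self_of_pairwise _ _ hp).symm
  | succ n ih =>
    rw [pvLoopA]
    cases l with
    | nil => simp [pvPass, PySem.List.sorted]
    | cons x t =>
      simp only [pvPass]
      cases h2 : (pvPassGo alfabeto x t).2 with
      | false =>
        rw [if_neg (by simp)]
        have hlt := (pass_go_inv alfabeto t x).2 h2
        rw [ih _ (by omega)]
        rw [sorted_unfold, sorted_unfold, pass_go_foldl]
      | true =>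
        rw [if_pos rfl]
        obtain ⟨h1, hp⟩ := pass_go_done alfabeto t x h2
        rw [h1, sorted_inst_bridge]
        exact (PySem.List.sorted_eq_self_of_pairwise _ _ hp).symm

theorem inv_le_sq (alfabeto : String) (l : List String) :
    pvInv alfabeto l ≤ l.length * l.length := by
  induction l with
  | nil => simp [pvInv]
  | cons x t ih =>
    have hc : pvCnt alfabeto x t ≤ t.length := List.countP_le_length
    have he : pvInv alfabeto (x :: t) = pvCnt alfabeto x t + pvInv alfabeto t := rfl
    rw [he]
    have hl : (x :: t).length = t.length + 1 := rfl
    rw [hl]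
    nlinarith

-- ===== VERDICT (by name: the statement is the Claim_ definition above) =====
theorem ordenar_extraterrestre_spec : Claim_equal_ordenar_extraterrestre := by
  intro lista alfabeto _
  show ordenar_extraterrestre lista alfabeto = ordenar_extraterrestre_alt lista alfabeto
  rw [ordenar_extraterrestre, ordenar_extraterrestre_alt,
    loop_spec alfabeto _ lista (le_trans (inv_le_sq alfabeto lista) (by omega))]
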